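-- pv_equiv track=rewrite | github.com/mussolene/1c_hbk_bsl | src/onec_hbk_bsl/analysis/bsl_string_regions.py | double_quoted_string_ranges
-- ===== SOURCE A (Python) =====
-- def double_quoted_string_ranges(content: str) -> list[tuple[int, int]]:
--     """
--     Return half-open [start, end) character offsets (Unicode code points) in *content*
--     that lie inside ``"..."`` literals. ``""`` escapes a single quote inside the literal.
--     """
--     n = len(content)
--     i = 0
--     in_string = False
--     start = 0
--     ranges: list[tuple[int, int]] = []
--     in_line_comment = False
--
--     while i < n:
--         c = content[i]
--         if in_line_comment:
--             if c == "\n":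
--                 in_line_comment = False
--             i += 1
--             continue
--
--         if not in_string:
--             if c == "/" and i + 1 < n and content[i + 1] == "/":
--                 in_line_comment = True
--                 i += 2
--                 continue
--             if c == '"':
--                 in_string = True
--                 start = i
--                 i += 1
--                 continue
--             i += 1
--             continue
--
--         # in_string
--         if c == '"':
--             if i + 1 < n and content[i + 1] == '"':
--                 i += 2
--                 continue
--             ranges.append((start, i + 1))
--             in_string = False
--             i += 1
--             continue
--         i += 1
--
--     if in_string:
--         ranges.append((start, n))
--
--     return ranges
-- ===== SOURCE B (Python) =====
-- def _string_end(content, j):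
--     """End offset (exclusive) of a string literal whose opening quote is just before j."""
--     n = len(content)
--     while j < n:
--         if content[j] != '"':
--             j += 1
--         elif content.startswith('""', j):
--             j += 2
--         else:
--             return j + 1
--     return n
--
--
-- def double_quoted_string_ranges(content: str) -> list[tuple[int, int]]:
--     n = len(content)
--     out = []
--     i = 0
--     while i < n:
--         c = content[i]
--         if c == '/' and content.startswith('//', i):
--             nl = content.find('\n', i + 2)
--             i = n if nl == -1 else nl
--         elif c == '"':
--             j = _string_end(content, i + 1)
--             out.append((i, j))
--             i = j
--         else:
--             i += 1
--     return out
-- ===== Notes on version B (the rewrite author's own statement) =====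
-- stated objective: alternative
-- what changed: Replaces A's per-character state machine with in_string/in_line_comment boolean flags and a post-loop fix-up by a token-at-a-time scanner: a comment is skipped in one str.find jump to the next newline, a whole string literal is consumed by a dedicated helper returning its end offset, and complete ranges are appended directly, so no mode flags or trailing-state patch exist.
import Mathlib
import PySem

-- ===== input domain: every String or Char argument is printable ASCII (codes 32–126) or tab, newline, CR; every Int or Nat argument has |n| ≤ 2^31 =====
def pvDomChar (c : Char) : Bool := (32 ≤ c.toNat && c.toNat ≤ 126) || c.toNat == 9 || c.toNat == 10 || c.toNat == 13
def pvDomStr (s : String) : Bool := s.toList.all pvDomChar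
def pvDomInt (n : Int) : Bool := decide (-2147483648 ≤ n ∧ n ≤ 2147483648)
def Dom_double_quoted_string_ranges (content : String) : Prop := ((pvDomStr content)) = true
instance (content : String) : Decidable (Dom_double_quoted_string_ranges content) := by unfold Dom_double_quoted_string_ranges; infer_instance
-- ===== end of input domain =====

-- B replaces A's boolean-flag state machine by a token-at-a-time scanner (whole comment
-- / whole string literal consumed by a dedicated helper, ranges built by cons); objective: alternative.

-- ===== PORT A =====
-- A's while-loop over offsets i with flags in_line_comment / in_string, accumulator `ranges`
-- appended at the back, and the trailing `if in_string: append (start, n)` (here: i = n when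
-- the list is exhausted).
def pvLoopA : List Char → Int → Bool → Bool → Int → List (Int × Int) → List (Int × Int)
  | [], i, _, inStr, start, ranges =>
      if inStr then ranges ++ [(start, i)] else ranges
  | c :: rest, i, inCom, inStr, start, ranges =>
      if inCom then
        if c = '\n' then pvLoopA rest (i + 1) false inStr start ranges
        else pvLoopA rest (i + 1) true inStr start ranges
      else if !inStr then
        if c = '/' ∧ rest.head? = some '/' then
          pvLoopA rest.tail (i + 2) true inStr start ranges
        else if c = '"' then
          pvLoopA rest (i + 1) inCom true i ranges
        else
          pvLoopA rest (i + 1) inCom inStr start ranges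
      else
        if c = '"' then
          if rest.head? = some '"' then
            pvLoopA rest.tail (i + 2) inCom inStr start ranges
          else
            pvLoopA rest (i + 1) inCom false start (ranges ++ [(start, i + 1)])
        else
          pvLoopA rest (i + 1) inCom inStr start ranges
termination_by cs _ _ _ _ _ => cs.length
decreasing_by all_goals (simp [List.length_tail]; try omega)

def double_quoted_string_ranges (content : String) : List (Int × Int) :=
  pvLoopA content.toList 0 false false 0 []

-- ===== PORT B =====
-- Source B's `_string_end`: chars after the opening quote + current offset ↦ (end offset, rest).
def pvStrEnd : List Char → Int → Int × List Char
  | [], j => (j, [])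
  | c :: rest, j =>
      if c ≠ '"' then pvStrEnd rest (j + 1)
      else if rest.head? = some '"' then pvStrEnd rest.tail (j + 2)
      else (j + 1, rest)
termination_by cs _ => cs.length
decreasing_by all_goals (simp [List.length_tail]; try omega)

-- needed for pvScanB's termination (cited in its decreasing_by)
theorem pvStrEnd_len : ∀ (n : Nat) (cs : List Char), cs.length ≤ n → ∀ (j : Int),
    (pvStrEnd cs j).2.length ≤ cs.length := by
  intro n
  induction n with
  | zero => intro cs h j; cases cs with
    | nil => simp [pvStrEnd]
    | cons c rest => simp at h
  | succ n ih =>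
    intro cs h j
    cases cs with
    | nil => simp [pvStrEnd]
    | cons c rest =>
      rw [pvStrEnd]
      split_ifs with h1 h2
      · exact le_trans (ih rest (by simp at h; omega) (j + 1)) (by simp)
      · refine le_trans (ih rest.tail (by simp [List.length_tail] at *; omega) (j + 2)) ?_
        simp [List.length_tail]; omega
      · simp

-- Source B's main loop: `content.find('\n', i+2)` on the remaining characters is
-- takeWhile/dropWhile (· ≠ '\n') — exact, including the `nl == -1` ⇒ i = n case.
def pvScanB : List Char → Int → List (Int × Int)
  | [], _ => []
  | c :: rest, i =>
      if c = '/' ∧ rest.head? = some '/' then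
        pvScanB (rest.tail.dropWhile (· ≠ '\n'))
          (i + 2 + ((rest.tail.takeWhile (· ≠ '\n')).length : Int))
      else if c = '"' then
        let p := pvStrEnd rest (i + 1)
        (i, p.1) :: pvScanB p.2 p.1
      else pvScanB rest (i + 1)
termination_by cs _ => cs.length
decreasing_by
  · have := List.length_dropWhile_le (fun x => decide (x ≠ '\n')) rest.tail
    simp [List.length_tail] at *; omega
  · have := pvStrEnd_len rest.length rest le_rfl (i + 1); simp at *; omega
  · simp

def double_quoted_string_ranges_alt (content : String) : List (Int × Int) :=
  pvScanB content.toList 0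

-- ===== PRECONDITION & SPEC =====
def Spec_double_quoted_string_ranges (content : String) (out : List (Int × Int)) : Prop := out = double_quoted_string_ranges_alt content
instance (content : String) (out : List (Int × Int)) : Decidable (Spec_double_quoted_string_ranges content out) := by unfold Spec_double_quoted_string_ranges; infer_instance

-- ===== CLAIM (what is proved, stated in full; the proofs are below) =====
def Claim_equal_double_quoted_string_ranges : Prop := ∀ (content : String), Dom_double_quoted_string_ranges content → Spec_double_quoted_string_ranges content (double_quoted_string_ranges content)

-- ===== LEMMAS AND PROOFS =====

theorem pvLoopA_comment : ∀ (cs : List Char) (i start : Int) (ranges : List (Int × Int)),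
    pvLoopA cs i true false start ranges =
      pvLoopA (cs.dropWhile (· ≠ '\n')) (i + ((cs.takeWhile (· ≠ '\n')).length : Int))
        false false start ranges := by
  intro cs
  induction cs with
  | nil => intro i start ranges; simp [pvLoopA]
  | cons c rest ih =>
    intro i start ranges
    by_cases hc : c = '\n'
    · subst hc
      rw [pvLoopA]
      simp only [ite_true]
      have hd : (('\n' :: rest).dropWhile (· ≠ '\n')) = '\n' :: rest := by simp
      have ht : (('\n' :: rest).takeWhile (· ≠ '\n')) = [] := by simp
      rw [hd, ht]
      rw [pvLoopA]
      simp
    · rw [pvLoopA]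
      simp only [hc, ite_false]
      rw [ih]
      have hd : ((c :: rest).dropWhile (· ≠ '\n')) = rest.dropWhile (· ≠ '\n') := by
        simp [hc]
      have ht : ((c :: rest).takeWhile (· ≠ '\n')) = c :: rest.takeWhile (· ≠ '\n') := by
        simp [hc]
      rw [hd, ht]
      have : i + (((c :: rest.takeWhile (· ≠ '\n')).length : Nat) : Int)
           = i + 1 + ((rest.takeWhile (· ≠ '\n')).length : Int) := by
        simp; ring
      rw [this]
      simp

theorem pvLoopA_string : ∀ (n : Nat) (cs : List Char), cs.length ≤ n →
    ∀ (i start : Int) (ranges : List (Int × Int)),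
    pvLoopA cs i false true start ranges =
      pvLoopA (pvStrEnd cs i).2 (pvStrEnd cs i).1 false false start
        (ranges ++ [(start, (pvStrEnd cs i).1)]) := by
  intro n
  induction n with
  | zero => intro cs h i start ranges; cases cs with
    | nil => simp [pvLoopA, pvStrEnd]
    | cons c rest => simp at h
  | succ n ih =>
    intro cs h i start ranges
    cases cs with
    | nil => simp [pvLoopA, pvStrEnd]
    | cons c rest =>
      rw [pvLoopA, pvStrEnd]
      by_cases hc : c = '"'
      · simp only [hc, ite_false, ne_eq, not_true_eq_false, if_pos,
          Bool.not_true, Bool.false_eq_true]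
        by_cases hh : rest.head? = some '"'
        · simp only [hh, ite_true]
          exact ih rest.tail (by simp [List.length_tail] at *; omega) (i + 2) start ranges
        · simp only [hh, ite_false]
      · simp only [hc, ite_false, ne_eq, not_false_iff, if_pos,
          Bool.not_true, Bool.false_eq_true]
        exact ih rest (by simp at h; omega) (i + 1) start ranges

theorem pvLoopA_eq_scanB : ∀ (n : Nat) (cs : List Char), cs.length ≤ n →
    ∀ (i start : Int) (ranges : List (Int × Int)),
    pvLoopA cs i false false start ranges = ranges ++ pvScanB cs i := by
  intro n
  induction n with
  | zero => intro cs h i start ranges; cases cs with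
    | nil => simp [pvLoopA, pvScanB]
    | cons c rest => simp at h
  | succ n ih =>
    intro cs h i start ranges
    cases cs with
    | nil => simp [pvLoopA, pvScanB]
    | cons c rest =>
      rw [pvLoopA, pvScanB]
      by_cases h1 : c = '/' ∧ rest.head? = some '/'
      · simp only [if_pos h1, Bool.not_false, Bool.false_eq_true, if_false, ite_true]
        rw [pvLoopA_comment]
        exact ih (rest.tail.dropWhile (· ≠ '\n'))
          (by have := List.length_dropWhile_le (fun x => decide (x ≠ '\n')) rest.tail
              simp [List.length_tail] at *; omega) _ start ranges
      · by_cases h2 : c = '"'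
        · simp only [h2, ite_true, Bool.not_false]
          rw [pvLoopA_string rest.length rest le_rfl (i + 1) i ranges]
          rw [ih (pvStrEnd rest (i + 1)).2
              (by have := pvStrEnd_len rest.length rest le_rfl (i + 1); simp at *; omega)
              (pvStrEnd rest (i + 1)).1 i (ranges ++ [(i, (pvStrEnd rest (i + 1)).1)])]
          simp
        · simp only [h1, h2, ite_false, Bool.not_false]
          exact ih rest (by simp at h; omega) (i + 1) start ranges

-- ===== VERDICT (by name: the statement is the Claim_ definition above) =====
theorem double_quoted_string_ranges_spec : Claim_equal_double_quoted_string_ranges := by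
  intro content _
  unfold Spec_double_quoted_string_ranges double_quoted_string_ranges double_quoted_string_ranges_alt
  simpa using pvLoopA_eq_scanB content.toList.length content.toList le_rfl 0 0 []
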